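-- pv_equiv track=rewrite | github.com/Mainali1/Astra | src/features/summarizer.py | _find_significant_clusters
-- ===== SOURCE A (Python) =====
-- from typing import Dict, List, Optional, Any
--
-- def _find_significant_clusters(words: List[str], significant_words: List[str]) -> List[List[str]]:
--     """Find clusters of significant words in a sentence"""
--     clusters = []
--     current_cluster = []
--
--     for word in words:
--         if word.lower() in significant_words:
--             current_cluster.append(word)
--         else:
--             if len(current_cluster) > 0:
--                 clusters.append(current_cluster)
--                 current_cluster = []
--
--     if len(current_cluster) > 0:
--         clusters.append(current_cluster)
--
--     return clusters
-- ===== SOURCE B (Python) =====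
-- from typing import List
--
-- def _find_significant_clusters(words: List[str], significant_words: List[str]) -> List[List[str]]:
--     """Find clusters of significant words in a sentence.
--
--     Builds the cluster list BACK-TO-FRONT: walk the words from last to first;
--     a significant word either opens a fresh cluster at the front of the result
--     or is prepended to the cluster it adjoins (the one started by the
--     significant word immediately to its right)."""
--     clusters: List[List[str]] = []
--     attach = False  # does the word to the right belong to the front cluster?
--     for i in range(len(words) - 1, -1, -1):
--         w = words[i]
--         if w.lower() in significant_words:
--             if attach:
--                 clusters[0].insert(0, w)
--             else:
--                 clusters.insert(0, [w])
--             attach = True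
--         else:
--             attach = False
--     return clusters
-- ===== Notes on version B (the rewrite author's own statement) =====
-- stated objective: alternative
-- what changed: Replaced A's left-to-right accumulate-and-flush state machine (pending current_cluster buffer with flush points and a final flush) by a right-to-left traversal that builds the cluster list back-to-front, prepending each significant word to the adjoining front cluster or opening a new one, with no pending buffer and no final flush.
import Mathlib
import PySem

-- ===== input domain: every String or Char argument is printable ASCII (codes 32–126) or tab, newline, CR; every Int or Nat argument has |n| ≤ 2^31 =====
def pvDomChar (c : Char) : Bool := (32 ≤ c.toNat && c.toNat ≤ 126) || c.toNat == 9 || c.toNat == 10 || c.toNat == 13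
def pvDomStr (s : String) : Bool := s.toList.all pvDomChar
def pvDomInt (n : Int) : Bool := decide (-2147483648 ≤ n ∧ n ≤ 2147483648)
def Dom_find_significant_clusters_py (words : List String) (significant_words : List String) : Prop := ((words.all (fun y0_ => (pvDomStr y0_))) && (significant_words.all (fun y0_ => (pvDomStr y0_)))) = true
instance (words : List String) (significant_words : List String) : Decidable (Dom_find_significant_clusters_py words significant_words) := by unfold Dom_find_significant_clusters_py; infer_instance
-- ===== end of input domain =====

-- B builds the cluster list back-to-front by a right-to-left traversal (prepend to the
-- adjoining cluster or open a new one), instead of A's left-to-right buffer-and-flush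
-- state machine; objective: alternative algorithmic decomposition, same cost.

-- shared helper: the membership test `word.lower() in significant_words` of both Pythons
def pvKey (significant_words : List String) (w : String) : Bool :=
  significant_words.contains (PySem.Str.lower w)

-- ===== PORT A =====
-- literal port of A: fold over words carrying (clusters, current_cluster), final flush
def find_significant_clusters_py (words : List String) (significant_words : List String) : List (List String) :=
  let st := words.foldl
    (fun (st : List (List String) × List String) word =>
      if pvKey significant_words word then
        (st.1, st.2 ++ [word])
      else
        if st.2.length > 0 then (st.1 ++ [st.2], []) else st)
    ([], [])
  if st.2.length > 0 then st.1 ++ [st.2] else st.1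

-- ===== PORT B =====
-- one step of B's right-to-left loop body; state = (clusters, attach flag)
-- (the `clusters[0].insert(0, w)` branch is only reached with clusters nonempty in
-- Python; the [] case of the match is therefore unreachable)
def pvStepB (key : String → Bool) (w : String)
    (st : List (List String) × Bool) : List (List String) × Bool :=
  if key w then
    (if st.2 then
       (match st.1 with
        | c :: cs => (w :: c) :: cs
        | [] => [[w]])
     else [w] :: st.1, true)
  else (st.1, false)

-- literal port of B: fold over the reversed word list, building clusters back-to-front
def find_significant_clusters_py_alt (words : List String) (significant_words : List String) : List (List String) :=
  (words.reverse.foldl (fun st w => pvStepB (pvKey significant_words) w st) ([], false)).1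

-- ===== PRECONDITION & SPEC =====
def Spec_find_significant_clusters_py (words : List String) (significant_words : List String) (out : List (List String)) : Prop := out = find_significant_clusters_py_alt words significant_words
instance (words : List String) (significant_words : List String) (out : List (List String)) : Decidable (Spec_find_significant_clusters_py words significant_words out) := by unfold Spec_find_significant_clusters_py; infer_instance

-- ===== CLAIM (what is proved, stated in full; the proofs are below) =====
def Claim_equal_find_significant_clusters_py : Prop := ∀ (words : List String) (significant_words : List String), Dom_find_significant_clusters_py words significant_words → Spec_find_significant_clusters_py words significant_words (find_significant_clusters_py words significant_words)

-- ===== LEMMAS AND PROOFS =====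

-- common recursive specification both ports are reduced to
def pvSpecF (key : String → Bool) (cur : List String) : List String → List (List String)
  | [] => if cur.isEmpty then [] else [cur]
  | w :: ws =>
    if key w then pvSpecF key (cur ++ [w]) ws
    else (if cur.isEmpty then [] else [cur]) ++ pvSpecF key [] ws

-- A's fold, with the final flush, computes pvSpecF
theorem pvA_eq_specF (key : String → Bool) (ws : List String) :
    ∀ (cs : List (List String)) (cur : List String),
      (let st := ws.foldl
        (fun (st : List (List String) × List String) word =>
          if key word then (st.1, st.2 ++ [word])
          else if st.2.length > 0 then (st.1 ++ [st.2], []) else st) (cs, cur)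
       if st.2.length > 0 then st.1 ++ [st.2] else st.1)
      = cs ++ pvSpecF key cur ws := by
  induction ws with
  | nil =>
    intro cs cur
    simp only [List.foldl_nil, pvSpecF]
    cases cur <;> simp
  | cons w ws ih =>
    intro cs cur
    simp only [List.foldl_cons, pvSpecF]
    by_cases hk : key w
    · simp only [hk, if_true]
      exact ih cs (cur ++ [w])
    · simp only [hk]
      cases cur with
      | nil => simpa using ih cs []
      | cons c cur' =>
        have hpos : (c :: cur').length > 0 := by simp
        rw [if_pos hpos]
        simp only [List.isEmpty_cons]
        simpa using ih (cs ++ [c :: cur']) []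

-- pvSpecF on a pending nonempty (significant) cluster swallows the maximal run
theorem pvSpecF_run (key : String → Bool) (xs : List String) :
    ∀ cur : List String, cur ≠ [] →
      pvSpecF key cur xs
        = (cur ++ xs.takeWhile key) :: pvSpecF key [] (xs.dropWhile key) := by
  induction xs with
  | nil => intro cur h; simp [pvSpecF, h]
  | cons x xs ih =>
    intro cur h
    by_cases hk : key x
    · simp only [pvSpecF, hk, if_true, List.takeWhile_cons, List.dropWhile_cons]
      rw [ih (cur ++ [x]) (by simp)]
      simp
    · simp only [pvSpecF, hk, List.takeWhile_cons, List.dropWhile_cons]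
      simp [h, hk, pvSpecF]

-- B's right-to-left loop as a foldr; its invariant: after processing a suffix, the
-- state is (its clusters, whether the suffix starts with a significant word)
theorem pvB_inv (key : String → Bool) (ws : List String) :
    ws.foldr (fun w st => pvStepB key w st) ([], false)
      = (pvSpecF key [] ws,
         match ws with | [] => false | w :: _ => key w) := by
  induction ws with
  | nil => simp [pvSpecF]
  | cons w rest ih =>
    rw [List.foldr_cons, ih]
    by_cases hk : key w
    · cases rest with
      | nil => simp [pvStepB, hk, pvSpecF]
      | cons r rs =>
        by_cases hr : key r
        · -- attach: prepend w to the front cluster of rest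
          have hrun : pvSpecF key [] (r :: rs)
              = (r :: rs.takeWhile key) :: pvSpecF key [] (rs.dropWhile key) := by
            have := pvSpecF_run key rs [r] (by simp)
            simpa [pvSpecF, hr] using this
          have htgt : pvSpecF key [] (w :: r :: rs)
              = (w :: r :: rs.takeWhile key) :: pvSpecF key [] (rs.dropWhile key) := by
            have h1 : pvSpecF key [] (w :: r :: rs) = pvSpecF key [w] (r :: rs) := by
              simp [pvSpecF, hk]
            rw [h1, pvSpecF_run key (r :: rs) [w] (by simp)]
            simp [hr]
          simp [pvStepB, hk, hr, hrun, htgt]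
        · -- fresh cluster [w] in front
          have htgt : pvSpecF key [] (w :: r :: rs)
              = [w] :: pvSpecF key [] (r :: rs) := by
            have h1 : pvSpecF key [] (w :: r :: rs) = pvSpecF key [w] (r :: rs) := by
              simp [pvSpecF, hk]
            rw [h1, pvSpecF_run key (r :: rs) [w] (by simp)]
            simp [hr]
          simp [pvStepB, hk, hr, htgt]
    · -- non-significant head is skipped
      have : pvSpecF key [] (w :: rest) = pvSpecF key [] rest := by
        simp [pvSpecF, hk]
      simp [pvStepB, hk, this]

-- ===== VERDICT (by name: the statement is the Claim_ definition above) =====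
theorem find_significant_clusters_py_spec : Claim_equal_find_significant_clusters_py := by
  intro words significant_words _
  unfold Spec_find_significant_clusters_py
  unfold find_significant_clusters_py find_significant_clusters_py_alt
  rw [List.foldl_reverse]
  rw [show (fun (x : String) (y : List (List String) × Bool) => pvStepB (pvKey significant_words) x y) = fun w st => pvStepB (pvKey significant_words) w st from rfl, pvB_inv (pvKey significant_words) words]
  simpa using pvA_eq_specF (pvKey significant_words) words [] []
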